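-- pv_equiv track=rewrite | github.com/Henryjones924/AOC | 2024/03/helper.py | parse_example_data
-- ===== SOURCE A (Python) =====
-- from typing import Any, Callable, Dict, List, Tuple
--
-- def parse_example_data(example_data: str) -> List[Dict[str, Any]]:
--     examples = []
--     current_example = {"data": [], "answer_a": None, "answer_b": None}
--
--     for line in example_data.splitlines():
--         line = line.strip()
--         if line.startswith("https://") or not line or line.startswith("---"):
--             continue
--         if line.startswith("answer_a:"):
--             current_example["answer_a"] = line.split("answer_a:")[1].strip()
--         elif line.startswith("answer_b:"):
--             current_example["answer_b"] = line.split("answer_b:")[1].strip()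
--             current_example["data"] = "\n".join(current_example["data"])
--             examples.append(current_example)
--             current_example = {"data": [], "answer_a": None, "answer_b": None}
--         else:
--             current_example["data"].append(line)
--
--     return examples
-- ===== SOURCE B (Python) =====
-- from typing import Any, Callable, Dict, List, Tuple
--
--
-- def _example(body: List[str], closer: str) -> Dict[str, Any]:
--     data = [l for l in body if not l.startswith("answer_a:")]
--     a_lines = [l for l in body if l.startswith("answer_a:")]
--     return {
--         "data": "\n".join(data),
--         "answer_a": a_lines[-1].split("answer_a:")[1].strip() if a_lines else None,
--         "answer_b": closer.split("answer_b:")[1].strip(),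
--     }
--
--
-- def parse_example_data(example_data: str) -> List[Dict[str, Any]]:
--     cleaned = [
--         l
--         for l in (ln.strip() for ln in example_data.splitlines())
--         if l and not l.startswith("https://") and not l.startswith("---")
--     ]
--     examples = []
--     rest = cleaned
--     while rest:
--         i = 0
--         while i < len(rest) and not rest[i].startswith("answer_b:"):
--             i += 1
--         if i == len(rest):
--             break
--         examples.append(_example(rest[:i], rest[i]))
--         rest = rest[i + 1:]
--     return examples
-- ===== Notes on version B (the rewrite author's own statement) =====
-- stated objective: alternative
-- what changed: Replaces A's single-pass mutable-dict state machine with a clean-then-segment pipeline: first build the cleaned line list, then repeatedly span off the lines up to the next 'answer_b:' closer, and build each example from its group with comprehensions (data = non-answer_a lines, answer_a = last answer_a line).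
import Mathlib
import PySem

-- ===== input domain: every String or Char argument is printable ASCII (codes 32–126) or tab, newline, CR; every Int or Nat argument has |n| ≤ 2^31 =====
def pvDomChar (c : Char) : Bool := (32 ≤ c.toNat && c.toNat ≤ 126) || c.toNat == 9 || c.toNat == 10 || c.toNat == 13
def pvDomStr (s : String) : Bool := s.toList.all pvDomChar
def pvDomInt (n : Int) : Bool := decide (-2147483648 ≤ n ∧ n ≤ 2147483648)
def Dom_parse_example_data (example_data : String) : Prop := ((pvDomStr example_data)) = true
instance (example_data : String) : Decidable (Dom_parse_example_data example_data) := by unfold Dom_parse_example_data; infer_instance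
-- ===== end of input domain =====

-- B restructures A's single-pass mutable-dict state machine into a pipeline: clean the line list,
-- then span off groups ending at each "answer_b:" line, then build each example with comprehensions.
-- Same return value on every input (alternative decomposition, no speed claim).

-- shared helper: both Pythons compute `line.split(sep)[1].strip()` (guarded total: the index-1
-- access is only reached when `line.startswith(sep)`, so split? yields ≥ 2 parts and Python never raises)
def pvAfter (line sep : String) : String :=
  PySem.Str.strip (((PySem.Str.split? line sep).getD []).getD 1 "")

-- ===== PORT A =====
-- A's for-loop over splitlines, state = (examples, current data lines, current answer_a)
def pvLoopA : List String → List (List (String × Option String)) → List String → Option String →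
    List (List (String × Option String))
  | [], examples, _, _ => examples
  | line :: rest, examples, data, ansA =>
    let l := PySem.Str.strip line
    if PySem.Str.startswith l "https://" || l == "" || PySem.Str.startswith l "---" then
      pvLoopA rest examples data ansA
    else if PySem.Str.startswith l "answer_a:" then
      pvLoopA rest examples data (some (pvAfter l "answer_a:"))
    else if PySem.Str.startswith l "answer_b:" then
      pvLoopA rest
        (examples ++ [[("data", some (PySem.Str.join "\n" data)), ("answer_a", ansA),
                       ("answer_b", some (pvAfter l "answer_b:"))]])
        [] none
    else
      pvLoopA rest examples (data ++ [l]) ansA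

def parse_example_data (example_data : String) : List (List (String × Option String)) :=
  pvLoopA (PySem.Str.splitlines example_data) [] [] none

-- ===== PORT B =====
-- Source B's _example: comprehensions over the group body, last answer_a line wins
def pvExample (body : List String) (closer : String) : List (String × Option String) :=
  let data := body.filter (fun l => !(PySem.Str.startswith l "answer_a:"))
  let aLines := body.filter (fun l => PySem.Str.startswith l "answer_a:")
  [("data", some (PySem.Str.join "\n" data)),
   ("answer_a", aLines.getLast?.map (fun al => pvAfter al "answer_a:")),
   ("answer_b", some (pvAfter closer "answer_b:"))]


-- Source B's while loop: span off the lines before the next "answer_b:" closer, emit, continue after it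
def pvGroups (rest : List String) : List (List (String × Option String)) :=
  let body := rest.takeWhile (fun l => !(PySem.Str.startswith l "answer_b:"))
  match h : rest.dropWhile (fun l => !(PySem.Str.startswith l "answer_b:")) with
  | [] => []
  | closer :: rs => pvExample body closer :: pvGroups rs
termination_by rest.length
decreasing_by
  have hsuf : List.length (rest.dropWhile (fun l => !(PySem.Str.startswith l "answer_b:"))) ≤ rest.length :=
    (List.dropWhile_suffix _).length_le
  rw [h] at hsuf; simp at hsuf; omega


def parse_example_data_alt (example_data : String) : List (List (String × Option String)) :=
  pvGroups (((PySem.Str.splitlines example_data).map PySem.Str.strip).filter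
    (fun l => l != "" && !(PySem.Str.startswith l "https://") && !(PySem.Str.startswith l "---")))

-- ===== PRECONDITION & SPEC =====
def Spec_parse_example_data (example_data : String) (out : List (List (String × Option String))) : Prop := out = parse_example_data_alt example_data
instance (example_data : String) (out : List (List (String × Option String))) : Decidable (Spec_parse_example_data example_data out) := by unfold Spec_parse_example_data; infer_instance

-- ===== CLAIM (what is proved, stated in full; the proofs are below) =====
def Claim_equal_parse_example_data : Prop := ∀ (example_data : String), Dom_parse_example_data example_data → Spec_parse_example_data example_data (parse_example_data example_data)

-- ===== LEMMAS AND PROOFS =====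

-- proof-side: A's state machine restricted to the already-cleaned lines
def pvG : List String → List String → Option String → List (List (String × Option String))
  | [], _, _ => []
  | l :: rest, data, ansA =>
    if PySem.Str.startswith l "answer_a:" then
      pvG rest data (some (pvAfter l "answer_a:"))
    else if PySem.Str.startswith l "answer_b:" then
      [("data", some (PySem.Str.join "\n" data)), ("answer_a", ansA),
       ("answer_b", some (pvAfter l "answer_b:"))] :: pvG rest [] none
    else
      pvG rest (data ++ [l]) ansA


lemma pv_keep (x y z : Bool) : (!y && !x && !z) = !(x || y || z) := by
  cases x <;> cases y <;> cases z <;> rfl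

lemma pvLoopA_eq_pvG (lines : List String) :
    ∀ examples data ansA,
      pvLoopA lines examples data ansA =
        examples ++ pvG ((lines.map PySem.Str.strip).filter
          (fun l => l != "" && !(PySem.Str.startswith l "https://") && !(PySem.Str.startswith l "---")))
          data ansA := by
  induction lines with
  | nil => intro ex data ansA; simp [pvLoopA, pvG]
  | cons line rest ih =>
    intro ex data ansA
    simp only [pvLoopA, List.map_cons, List.filter_cons]
    generalize PySem.Str.strip line = s
    rw [show (s != "") = !(s == "") from rfl, pv_keep]
    generalize (PySem.Str.startswith s "https://" || (s == "") || PySem.Str.startswith s "---") = c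
    cases c
    · simp [pvG, ih]; split_ifs <;> simp
    · simp [ih]
lemma pv_not_b_of_a (l : String) (h : PySem.Str.startswith l "answer_a:" = true) :
    PySem.Str.startswith l "answer_b:" = false := by
  by_contra hb
  simp only [Bool.not_eq_false] at hb
  rw [PySem.Str.startswith_eq, PySem.Chars.startswith_iff] at h hb
  have := (List.prefix_of_prefix_length_le h hb (by decide)).eq_of_length (by decide)
  simp at this

lemma pv_not_a_of_b (l : String) (h : PySem.Str.startswith l "answer_b:" = true) :
    PySem.Str.startswith l "answer_a:" = false := by
  by_contra ha
  simp only [Bool.not_eq_false] at ha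
  rw [pv_not_b_of_a l ha] at h
  exact absurd h (by decide)

-- proof-side: the group an example is built from, generalized by the state (data, ansA) carried in
def pvForm (data : List String) (ansA : Option String) (body : List String) (closer : String) :
    List (String × Option String) :=
  [("data", some (PySem.Str.join "\n" (data ++ body.filter (fun l => !(PySem.Str.startswith l "answer_a:"))))),
   ("answer_a",
      match (body.filter (fun l => PySem.Str.startswith l "answer_a:")).getLast? with
      | some al => some (pvAfter al "answer_a:")
      | none => ansA),
   ("answer_b", some (pvAfter closer "answer_b:"))]

lemma pvForm_nil_none (body : List String) (closer : String) :
    pvForm [] none body closer = pvExample body closer := by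
  unfold pvForm pvExample
  cases h : (body.filter (fun l => PySem.Str.startswith l "answer_a:")).getLast? <;>
    simp only [h] <;> rfl

lemma pvForm_cons_a (l : String) (ha : PySem.Str.startswith l "answer_a:" = true)
    (data : List String) (ansA : Option String) (body : List String) (closer : String) :
    pvForm data ansA (l :: body) closer = pvForm data (some (pvAfter l "answer_a:")) body closer := by
  unfold pvForm
  simp only [List.filter_cons, ha, Bool.not_true, Bool.false_eq_true, if_false, if_true,
    List.getLast?_cons]
  cases h : (body.filter (fun l => PySem.Str.startswith l "answer_a:")).getLast? <;>
    simp only [h] <;> rfl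

lemma pvForm_cons_d (l : String) (ha : PySem.Str.startswith l "answer_a:" = false)
    (data : List String) (ansA : Option String) (body : List String) (closer : String) :
    pvForm data ansA (l :: body) closer = pvForm (data ++ [l]) ansA body closer := by
  unfold pvForm
  simp only [List.filter_cons, ha, Bool.not_false, Bool.false_eq_true, if_false, if_true,
    List.append_assoc, List.cons_append, List.nil_append]

lemma pvG_eq_groups (lines : List String) :
    ∀ data ansA,
      pvG lines data ansA =
        (match lines.dropWhile (fun l => !(PySem.Str.startswith l "answer_b:")) with
         | [] => []
         | closer :: rs =>
           pvForm data ansA (lines.takeWhile (fun l => !(PySem.Str.startswith l "answer_b:"))) closer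
             :: pvGroups rs) := by
  induction lines with
  | nil => intro data ansA; simp [pvG]
  | cons l rest ih =>
    intro data ansA
    by_cases hb : PySem.Str.startswith l "answer_b:" = true
    · have ha := pv_not_a_of_b l hb
      have hrest : pvG rest [] none = pvGroups rest := by
        rw [ih [] none, pvGroups]
        cases hd : rest.dropWhile (fun l => !(PySem.Str.startswith l "answer_b:")) with
        | nil => simp
        | cons c rs => simp [pvForm_nil_none]
      simp only [pvG, ha, hb, List.dropWhile_cons, List.takeWhile_cons, Bool.not_true,
        Bool.false_eq_true, if_false, if_true, hrest]
      simp [pvForm]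
    · rw [Bool.not_eq_true] at hb
      by_cases ha : PySem.Str.startswith l "answer_a:" = true
      · simp only [pvG, ha, hb, if_true, List.dropWhile_cons, List.takeWhile_cons, Bool.not_false]
        rw [ih data (some (pvAfter l "answer_a:"))]
        cases hd : rest.dropWhile (fun l => !(PySem.Str.startswith l "answer_b:")) with
        | nil => simp
        | cons c rs => simp [pvForm_cons_a l ha]
      · rw [Bool.not_eq_true] at ha
        simp only [pvG, ha, hb, Bool.false_eq_true, if_false, List.dropWhile_cons,
          List.takeWhile_cons, Bool.not_false]
        rw [ih (data ++ [l]) ansA]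
        cases hd : rest.dropWhile (fun l => !(PySem.Str.startswith l "answer_b:")) with
        | nil => simp
        | cons c rs => simp [pvForm_cons_d l ha]

lemma pvG_nil_none (lines : List String) : pvG lines [] none = pvGroups lines := by
  rw [pvG_eq_groups lines [] none, pvGroups]
  cases hd : lines.dropWhile (fun l => !(PySem.Str.startswith l "answer_b:")) with
  | nil => simp
  | cons c rs => simp [pvForm_nil_none]

-- ===== VERDICT (by name: the statement is the Claim_ definition above) =====
theorem parse_example_data_spec : Claim_equal_parse_example_data := by
  intro s _
  unfold Spec_parse_example_data parse_example_data parse_example_data_alt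
  rw [pvLoopA_eq_pvG, pvG_nil_none]
  simp
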